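-- pv_equiv track=rewrite | github.com/Hxrdbvss/MPI_Labs | mpi_lab_5_2/lab5_2d_1.py | auxiliary_arrays_determination
-- ===== SOURCE A (Python) =====
-- def auxiliary_arrays_determination(total_size, num_procs):
--     block_size = total_size // num_procs
--     remainder = total_size % num_procs
--     rcounts = [block_size] * num_procs
--     for i in range(remainder):
--         rcounts[i] += 1
--     displs = [0] * num_procs
--     for i in range(1, num_procs):
--         displs[i] = displs[i-1] + rcounts[i-1]
--     return rcounts, displs
-- ===== SOURCE B (Python) =====
-- def auxiliary_arrays_determination(total_size, num_procs):
--     block_size = total_size // num_procs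
--     remainder = total_size % num_procs
--     rcounts = [block_size + (1 if i < remainder else 0) for i in range(num_procs)]
--     displs = [i * block_size + min(i, remainder) for i in range(num_procs)]
--     return rcounts, displs
-- ===== Notes on version B (the rewrite author's own statement) =====
-- stated objective: simpler
-- what changed: Replaces the mutate-in-place remainder loop and the prefix-sum displacement loop with direct closed-form comprehensions: rcounts[i] = block_size + (1 if i < remainder else 0) and displs[i] = i*block_size + min(i, remainder), with no accumulator.
import Mathlib
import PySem

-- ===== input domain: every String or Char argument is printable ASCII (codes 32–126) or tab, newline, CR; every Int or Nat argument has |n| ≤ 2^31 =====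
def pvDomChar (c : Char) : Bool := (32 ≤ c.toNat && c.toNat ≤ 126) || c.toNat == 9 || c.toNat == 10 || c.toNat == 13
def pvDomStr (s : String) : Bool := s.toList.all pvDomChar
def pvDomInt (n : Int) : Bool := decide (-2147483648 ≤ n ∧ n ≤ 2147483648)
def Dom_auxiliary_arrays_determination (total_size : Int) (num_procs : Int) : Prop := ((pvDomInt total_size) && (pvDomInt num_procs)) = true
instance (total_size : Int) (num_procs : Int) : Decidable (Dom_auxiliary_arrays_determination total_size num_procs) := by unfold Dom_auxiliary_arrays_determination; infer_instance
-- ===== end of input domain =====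

-- B replaces A's in-place increment loop and prefix-sum loop by closed-form per-index expressions (simpler; same O(n) cost).


-- ===== PORT A =====
-- '[x] * n' is List.replicate n.toNat x (Python yields [] for n ≤ 0); each
-- in-place 'xs[i] = v' / 'xs[i] += 1' on an in-range index is PySem.List.pySetD/pyGetD.
def auxiliary_arrays_determination (total_size : Int) (num_procs : Int) : List Int × List Int :=
  let block_size := PySem.Int.floordiv total_size num_procs
  let remainder := PySem.Int.mod total_size num_procs
  let rcounts0 := List.replicate num_procs.toNat block_size
  let rcounts := (PySem.List.pyRange 0 remainder 1).foldl
      (fun rc i => PySem.List.pySetD rc i (PySem.List.pyGetD rc i 0 + 1)) rcounts0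
  let displs0 := List.replicate num_procs.toNat (0 : Int)
  let displs := (PySem.List.pyRange 1 num_procs 1).foldl
      (fun d i => PySem.List.pySetD d i (PySem.List.pyGetD d (i-1) 0 + PySem.List.pyGetD rcounts (i-1) 0)) displs0
  (rcounts, displs)

-- ===== PORT B =====
def auxiliary_arrays_determination_alt (total_size : Int) (num_procs : Int) : List Int × List Int :=
  let block_size := PySem.Int.floordiv total_size num_procs
  let remainder := PySem.Int.mod total_size num_procs
  ((PySem.List.pyRange 0 num_procs 1).map (fun i => block_size + if i < remainder then 1 else 0),
   (PySem.List.pyRange 0 num_procs 1).map (fun i => i * block_size + min i remainder))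

-- ===== PRECONDITION & SPEC =====
-- Python raises ZeroDivisionError at the first line iff num_procs == 0 (in both A and B).
def Pre_auxiliary_arrays_determination (total_size : Int) (num_procs : Int) : Prop := num_procs ≠ 0
instance (total_size : Int) (num_procs : Int) : Decidable (Pre_auxiliary_arrays_determination total_size num_procs) := by unfold Pre_auxiliary_arrays_determination; infer_instance

def pvWitness_auxiliary_arrays_determination : Int × Int := (10, 3)

def Spec_auxiliary_arrays_determination (total_size : Int) (num_procs : Int) (out : List Int × List Int) : Prop := out = auxiliary_arrays_determination_alt total_size num_procs
instance (total_size : Int) (num_procs : Int) (out : List Int × List Int) : Decidable (Spec_auxiliary_arrays_determination total_size num_procs out) := by unfold Spec_auxiliary_arrays_determination; infer_instance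

-- ===== CLAIM (what is proved, stated in full; the proofs are below) =====
def Claim_equal_auxiliary_arrays_determination : Prop := ∀ (total_size : Int) (num_procs : Int), Dom_auxiliary_arrays_determination total_size num_procs → Pre_auxiliary_arrays_determination total_size num_procs → Spec_auxiliary_arrays_determination total_size num_procs (auxiliary_arrays_determination total_size num_procs)

-- ===== LEMMAS AND PROOFS =====

-- getD on a comprehension over range(n): the closed-form value at an in-range index.
theorem pv_getD_map (n j : Nat) (f : ℕ → Int) (hj : j < n) :
    ((List.range n).map (fun (k : ℕ) => f k)).getD j 0 = f j := by
  rw [List.getD_eq_getElem _ _ (by simpa using hj)]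
  simp

-- A's first loop: incrementing the first r slots of [b]*n gives the closed-form list.
theorem pv_rcounts_loop (b : Int) (r n : Nat) (hrn : r ≤ n) :
    (PySem.List.pyRange 0 (r : Int) 1).foldl
      (fun rc i => PySem.List.pySetD rc i (PySem.List.pyGetD rc i 0 + 1)) (List.replicate n b)
    = (List.range n).map (fun (k : ℕ) => if (k : Int) < (r : Int) then b + 1 else b) := by
  induction r with
  | zero =>
      rw [PySem.List.pyRange_one_eq_nil (by omega)]
      simp only [List.foldl_nil]
      apply List.ext_getElem
      · simp
      · intro k hk hk'
        rw [List.getElem_replicate, List.getElem_map, List.getElem_range, if_neg (by omega)]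
  | succ r ih =>
      rw [show ((r + 1 : Nat) : Int) = (r : Int) + 1 by push_cast; ring,
          PySem.List.pyRange_one_succ_right (by positivity), List.foldl_append,
          ih (by omega)]
      simp only [List.foldl_cons, List.foldl_nil]
      rw [PySem.List.pySetD_natCast, PySem.List.pyGetD_natCast,
          pv_getD_map n r _ (by omega), if_neg (by omega)]
      apply List.ext_getElem
      · simp
      · intro k hk hk'
        simp only [List.length_set, List.length_map, List.length_range] at hk
        simp only [List.getElem_set, List.getElem_map, List.getElem_range]
        by_cases hkr : r = k
        · subst hkr
          rw [if_pos rfl, if_pos (by omega)]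
        · rw [if_neg hkr]
          by_cases h2 : (k : Int) < (r : Int)
          · rw [if_pos h2, if_pos (by omega)]
          · rw [if_neg h2, if_neg (by omega)]

-- The prefix-sum step equals the closed form: D(m-1) + rcounts(m-1) = D(m).
theorem pv_step (b rI : Int) (m : Nat) (hm : 1 ≤ m) :
    (((m - 1 : Nat) : Int) * b + min ((m - 1 : Nat) : Int) rI) + (if ((m - 1 : Nat) : Int) < rI then b + 1 else b)
    = (m : Int) * b + min (m : Int) rI := by
  have h : ((m - 1 : Nat) : Int) = (m : Int) - 1 := by omega
  rw [h]
  rcases lt_or_ge ((m : Int) - 1) rI with h1 | h1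
  · rw [min_eq_left (by omega), min_eq_left (by omega), if_pos h1]; ring
  · rw [min_eq_right h1, min_eq_right (by omega), if_neg (by omega)]; ring

-- A's second loop, as an invariant: after processing range(1, m), the first m slots
-- carry the closed-form displacement and the rest are still 0.
theorem pv_displs_loop (b rI : Int) (hr0 : 0 ≤ rI) (R : List Int)
    (hR : R = (List.range R.length).map (fun (k : ℕ) => if (k : Int) < rI then b + 1 else b))
    (m n : Nat) (hmn : m ≤ n) (hm : 1 ≤ m) (hn : n ≤ R.length) :
    (PySem.List.pyRange 1 (m : Int) 1).foldl
      (fun d i => PySem.List.pySetD d i (PySem.List.pyGetD d (i-1) 0 + PySem.List.pyGetD R (i-1) 0)) (List.replicate n (0 : Int))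
    = (List.range n).map (fun (k : ℕ) => if k < m then (k : Int) * b + min (k : Int) rI else 0) := by
  induction m with
  | zero => omega
  | succ m ih =>
      by_cases hm1 : m = 0
      · subst hm1
        rw [show ((0 + 1 : Nat) : Int) = 1 by norm_num, PySem.List.pyRange_one_eq_nil (by omega)]
        simp only [List.foldl_nil]
        apply List.ext_getElem
        · simp
        · intro k hk hk'
          simp only [List.length_replicate] at hk
          rw [List.getElem_replicate, List.getElem_map, List.getElem_range]
          by_cases hk0 : k < 0 + 1
          · have : k = 0 := by omega
            subst this
            rw [if_pos hk0]
            push_cast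
            rw [min_eq_left hr0]
            ring
          · rw [if_neg hk0]
      · have hm' : 1 ≤ m := by omega
        rw [show ((m + 1 : Nat) : Int) = (m : Int) + 1 by push_cast; ring,
            PySem.List.pyRange_one_succ_right (by exact_mod_cast hm'), List.foldl_append,
            ih (by omega) hm']
        simp only [List.foldl_cons, List.foldl_nil]
        have hmm : ((m : Int) - 1) = ((m - 1 : Nat) : Int) := by omega
        rw [hmm, PySem.List.pySetD_natCast, PySem.List.pyGetD_natCast, PySem.List.pyGetD_natCast,
            pv_getD_map n (m - 1) _ (by omega), if_pos (show m - 1 < m by omega)]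
        have hRm : R.getD (m - 1) 0 = (if ((m - 1 : Nat) : Int) < rI then b + 1 else b) := by
          conv_lhs => rw [hR]
          exact pv_getD_map R.length (m - 1) _ (by omega)
        rw [hRm, pv_step b rI m hm']
        apply List.ext_getElem
        · simp
        · intro k hk hk'
          simp only [List.length_set, List.length_map, List.length_range] at hk
          simp only [List.getElem_set, List.getElem_map, List.getElem_range]
          by_cases hkm : m = k
          · subst hkm
            rw [if_pos rfl, if_pos (by omega)]
          · rw [if_neg hkm]
            by_cases h2 : k < m
            · rw [if_pos h2, if_pos (by omega)]
            · rw [if_neg h2, if_neg (by omega)]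

-- B's maps over range(num_procs), rewritten over List.range (num_procs ≥ 0).
theorem pv_map_pyRange_zero (n : Nat) (f : Int → Int) :
    (PySem.List.pyRange 0 (n : Int) 1).map f = (List.range n).map (fun (k : ℕ) => f (k : Int)) := by
  rw [PySem.List.pyRange_one]
  simp [List.map_map, Function.comp]

-- ===== VERDICT (by name: the statement is the Claim_ definition above) =====
theorem auxiliary_arrays_determination_spec : Claim_equal_auxiliary_arrays_determination := by
  intro total_size num_procs _ hpre
  unfold Spec_auxiliary_arrays_determination auxiliary_arrays_determination auxiliary_arrays_determination_alt
  dsimp only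
  set b := PySem.Int.floordiv total_size num_procs with hb
  set rI := PySem.Int.mod total_size num_procs with hr
  rcases lt_trichotomy num_procs 0 with hneg | hz | hpos
  · -- num_procs < 0: every list involved is empty
    have h1 : num_procs.toNat = 0 := by omega
    have h2 : rI ≤ 0 := (PySem.Int.mod_neg_bounds total_size hneg).2
    rw [PySem.List.pyRange_one_eq_nil h2, PySem.List.pyRange_one_eq_nil (by omega),
        PySem.List.pyRange_one_eq_nil (le_of_lt hneg), h1]
    simp
  · exact absurd hz hpre
  · -- num_procs > 0
    have hr0 : (0 : Int) ≤ rI := PySem.Int.mod_nonneg total_size hpos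
    have hrlt : rI < num_procs := PySem.Int.mod_lt total_size hpos
    obtain ⟨n, rfl⟩ : ∃ n : Nat, (n : Int) = num_procs := ⟨num_procs.toNat, by omega⟩
    obtain ⟨r, hrI⟩ : ∃ r : Nat, (r : Int) = rI := ⟨rI.toNat, by omega⟩
    rw [Int.toNat_natCast, ← hrI, pv_rcounts_loop b r n (by omega), hrI]
    have hlen : ((List.range n).map (fun (k : ℕ) => if (k : Int) < rI then b + 1 else b)).length = n := by simp
    rw [pv_displs_loop b rI hr0 _ (by rw [hlen]) n n (le_refl n) (by omega) (by rw [hlen])]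
    rw [pv_map_pyRange_zero n (fun i => b + if i < rI then 1 else 0),
        pv_map_pyRange_zero n (fun i => i * b + min i rI)]
    refine Prod.ext ?_ ?_
    · apply List.map_congr_left
      intro k _
      by_cases h : (k : Int) < rI
      · rw [if_pos h, if_pos h]
      · rw [if_neg h, if_neg h]; ring
    · apply List.map_congr_left
      intro k hk
      simp only [List.mem_range] at hk
      rw [if_pos hk]
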